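-- pv_equiv track=rewrite | github.com/abhishrut-parolekar/Python | assignment2.py | func
-- ===== SOURCE A (Python) =====
-- def func(limit):
--     l=[]
--     for i in range(limit):
--         if i%3!=0 and i%7==0:
--             l.append(i)
--         else:
--             continue
--     return l
-- ===== SOURCE B (Python) =====
-- def func(limit):
--     # Walk the multiples of 7 downward from the largest one below limit,
--     # collecting those not divisible by 3, then reverse to ascending order.
--     if limit <= 0:
--         return []
--     rev = []
--     k = ((limit - 1) // 7) * 7
--     while k >= 0:
--         if k % 3 != 0:
--             rev.append(k)
--         k -= 7
--     rev.reverse()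
--     return rev
-- ===== Notes on version B (the rewrite author's own statement) =====
-- stated objective: faster
-- what changed: B builds the list back-to-front: it walks the multiples of 7 downward from the largest one below limit, collecting those not divisible by 3 and reversing at the end, instead of A's full ascending scan of range(limit) with a two-condition divisibility filter.
import Mathlib
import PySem

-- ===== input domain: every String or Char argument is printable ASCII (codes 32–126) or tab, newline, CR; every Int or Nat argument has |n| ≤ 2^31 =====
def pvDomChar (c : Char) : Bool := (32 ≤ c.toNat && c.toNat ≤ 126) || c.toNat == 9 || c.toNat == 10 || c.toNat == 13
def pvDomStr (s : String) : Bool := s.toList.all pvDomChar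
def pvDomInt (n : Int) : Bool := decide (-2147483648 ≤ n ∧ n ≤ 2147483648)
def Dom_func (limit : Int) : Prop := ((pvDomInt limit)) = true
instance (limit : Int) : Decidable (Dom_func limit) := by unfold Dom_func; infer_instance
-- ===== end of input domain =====

-- B builds the result back-to-front: it walks the multiples of 7 downward from the
-- largest one below limit, collecting those not divisible by 3 and reversing at the end,
-- instead of A's ascending scan of range(limit) with a two-condition filter.

-- ===== PORT A =====
def func (limit : Int) : List Int :=
  (PySem.List.pyRange 0 limit 1).foldl
    (fun l i => if PySem.Int.mod i 3 ≠ 0 ∧ PySem.Int.mod i 7 = 0 then l ++ [i] else l) []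

-- ===== PORT B =====
-- the downward while loop: at step n the current multiple is k = 7*n; append if k%3≠0, then k -= 7
def funcAltGo : Nat → List Int → List Int
  | 0, rev => if PySem.Int.mod 0 3 ≠ 0 then rev ++ [(0 : Int)] else rev
  | n + 1, rev =>
      funcAltGo n (if PySem.Int.mod (7 * ((n : Int) + 1)) 3 ≠ 0
                   then rev ++ [7 * ((n : Int) + 1)] else rev)

def func_alt (limit : Int) : List Int :=
  if limit ≤ 0 then []
  else (funcAltGo (PySem.Int.floordiv (limit - 1) 7).toNat []).reverse

-- ===== PRECONDITION & SPEC =====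
def Spec_func (limit : Int) (out : List Int) : Prop := out = func_alt limit
instance (limit : Int) (out : List Int) : Decidable (Spec_func limit out) := by unfold Spec_func; infer_instance

-- ===== CLAIM (what is proved, stated in full; the proofs are below) =====
def Claim_equal_func : Prop := ∀ (limit : Int), Dom_func limit → Spec_func limit (func limit)

-- ===== LEMMAS AND PROOFS =====

-- A's result is a filter of range(limit)
theorem func_eq_filter (limit : Int) :
    func limit = (PySem.List.pyRange 0 limit 1).filter
      (fun i => decide (PySem.Int.mod i 3 ≠ 0 ∧ PySem.Int.mod i 7 = 0)) := by
  unfold func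
  rw [show (fun (l : List Int) i => if PySem.Int.mod i 3 ≠ 0 ∧ PySem.Int.mod i 7 = 0 then l ++ [i] else l)
      = (fun l i => if (decide (PySem.Int.mod i 3 ≠ 0 ∧ PySem.Int.mod i 7 = 0)) = true then l ++ [i] else l)
      from by funext l i; simp]
  rw [PySem.List.foldl_append_if_eq_filter]
  simp

-- the ascending list B's prepending loop produces
def bList (n : Nat) : List Int :=
  ((List.range (n + 1)).map (fun (j : Nat) => (7 : Int) * (j : Int))).filter
    (fun i => decide (PySem.Int.mod i 3 ≠ 0))

theorem funcAltGo_eq (n : Nat) (rev : List Int) :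
    funcAltGo n rev = rev ++ (bList n).reverse := by
  induction n generalizing rev with
  | zero =>
      simp [funcAltGo, bList, List.range_succ]
  | succ n ih =>
      have hsplit : bList (n + 1)
          = bList n ++ (if PySem.Int.mod (7 * ((n : Int) + 1)) 3 ≠ 0
                        then [(7 * ((n : Int) + 1) : Int)] else []) := by
        unfold bList
        rw [List.range_succ, List.map_append, List.filter_append]
        split_ifs with h <;> simp_all
      rw [funcAltGo, ih, hsplit, List.reverse_append]
      split_ifs <;> simp

theorem func_alt_eq_filter (limit : Int) (h : 0 < limit) :
    func_alt limit = bList (PySem.Int.floordiv (limit - 1) 7).toNat := by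
  unfold func_alt
  rw [if_neg (by omega), funcAltGo_eq, List.nil_append, List.reverse_reverse]

theorem pairwise_lt_bList (n : Nat) : (bList n).Pairwise (· < ·) := by
  unfold bList
  exact (List.pairwise_lt_range.map (fun (j : Nat) => (7 : Int) * (j : Int))
    (fun a b hab => by push_cast; omega)).filter _

-- ===== VERDICT (by name: the statement is the Claim_ definition above) =====
theorem func_spec : Claim_equal_func := by
  intro limit _
  unfold Spec_func
  by_cases hpos : 0 < limit
  · rw [func_eq_filter, func_alt_eq_filter limit hpos]
    set q := PySem.Int.floordiv (limit - 1) 7 with hq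
    have hbr : q * 7 ≤ limit - 1 ∧ limit - 1 < (q + 1) * 7 :=
      (PySem.Int.floordiv_eq_iff_of_pos (by norm_num)).1 hq.symm
    have hq0 : 0 ≤ q := by nlinarith [hbr.1, hbr.2]
    have s1 : (List.filter (fun i => decide (PySem.Int.mod i 3 ≠ 0 ∧ PySem.Int.mod i 7 = 0))
        (PySem.List.pyRange 0 limit 1)).Pairwise (· < ·) :=
      (PySem.List.pairwise_lt_pyRange_one 0 limit).filter _
    have s2 := pairwise_lt_bList q.toNat
    have hmem : ∀ x : Int,
        x ∈ List.filter (fun i => decide (PySem.Int.mod i 3 ≠ 0 ∧ PySem.Int.mod i 7 = 0))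
              (PySem.List.pyRange 0 limit 1)
        ↔ x ∈ bList q.toNat := by
      intro x
      simp only [bList, List.mem_filter, List.mem_map, List.mem_range,
        PySem.List.mem_pyRange_one, decide_eq_true_eq]
      constructor
      · rintro ⟨⟨h0, hl⟩, h3, h7⟩
        obtain ⟨c, hc⟩ := (PySem.Int.mod_eq_zero_iff_dvd x 7).1 h7
        refine ⟨⟨c.toNat, by omega, by omega⟩, h3⟩
      · rintro ⟨⟨j, hj, hjx⟩, h3⟩
        refine ⟨⟨by omega, by omega⟩, h3,
          (PySem.Int.mod_eq_zero_iff_dvd x 7).2 ⟨j, by omega⟩⟩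
    exact List.Perm.eq_of_pairwise (fun a b _ _ h1 h2 => absurd h2 (not_lt.2 h1.le))
      s1 s2 ((List.perm_ext_iff_of_nodup s1.nodup s2.nodup).2 hmem)
  · rw [func_eq_filter]
    unfold func_alt
    rw [if_pos (by omega), PySem.List.pyRange_one_eq_nil (by omega), List.filter_nil]
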